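-- pv_equiv track=rewrite | github.com/bakal3110/Python-Courses-and-Projects | PascalTri.py | find_frequent_binomials_fastest
-- ===== SOURCE A (Python) =====
-- def find_frequent_binomials_fastest(min_n=10, max_n=250, threshold=3):
--     freq = {}
--
--     for n in range(min_n, max_n + 1):
--         # Manual computation for small optimization
--         current = n * (n - 1) // 2
--         freq[current] = freq[current] + 1 if current in freq else 1
--
--         k = 2
--         while k < n - 2:
--             current = current * (n - k) // (k + 1)
--             freq[current] = freq[current] + 1 if current in freq else 1
--             k += 1
--
--     # Pre-allocate result array for speed
--     result = []
--     for val in freq: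
--         if freq[val] > threshold:
--             result.append(val)
--
--     result.sort()
--     return result
-- ===== SOURCE B (Python) =====
-- def _comb(n, k):
--     if n - k < k:
--         k = n - k
--     num = 1
--     den = 1
--     for i in range(k):
--         num *= n - i
--         den *= i + 1
--     return num // den
--
--
-- def find_frequent_binomials_fastest(min_n=10, max_n=250, threshold=3):
--     # Generate every coefficient value directly (no running product), count, filter, sort.
--     values = []
--     for n in range(min_n, max_n + 1):
--         values.append(n * (n - 1) // 2)
--         for k in range(3, n - 1):
--             values.append(_comb(n, k))
--     freq = {}
--     for v in values:
--         freq[v] = freq.get(v, 0) + 1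
--     return sorted(v for v, c in freq.items() if c > threshold)
-- ===== Notes on version B (the rewrite author's own statement) =====
-- stated objective: simpler
-- what changed: B replaces A's cross-k running-product recurrence threaded through the while loop by a direct independent computation of each binomial coefficient, collects all generated values in one list, counts them with a single get-based dict pass, and returns the sorted filtered keys as a comprehension.
import Mathlib
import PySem

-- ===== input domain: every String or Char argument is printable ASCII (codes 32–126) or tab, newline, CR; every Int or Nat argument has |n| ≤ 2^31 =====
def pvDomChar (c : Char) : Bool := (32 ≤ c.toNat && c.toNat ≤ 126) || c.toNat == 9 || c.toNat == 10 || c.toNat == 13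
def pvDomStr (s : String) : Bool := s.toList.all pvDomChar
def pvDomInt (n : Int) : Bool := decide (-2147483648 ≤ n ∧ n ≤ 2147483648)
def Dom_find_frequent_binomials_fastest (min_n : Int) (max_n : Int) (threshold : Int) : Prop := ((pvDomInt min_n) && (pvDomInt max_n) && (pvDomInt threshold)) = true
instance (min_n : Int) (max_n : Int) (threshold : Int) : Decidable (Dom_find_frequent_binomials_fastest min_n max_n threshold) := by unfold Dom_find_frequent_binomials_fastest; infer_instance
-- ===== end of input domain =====

-- B replaces A's running-product recurrence by a direct per-(n,k) binomial computation feeding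
-- a list of values that is counted once and filtered; objective: simpler decomposition, not speed.


-- ===== PORT A =====
-- freq[current] = freq[current] + 1 if current in freq else 1, i.e. freq[current] = freq.get(current, 0) + 1:
-- ported with PySem.Dict.modify (exact for d[k] = f(d.get(k, dflt)))
def pvTallyA (freq : PySem.Dict Int Int) (v : Int) : PySem.Dict Int Int :=
  freq.modify v 0 (· + 1)

-- the 'while k < n - 2' loop; fuel = (n - 2 - k).toNat at entry, so 0 < fuel ↔ k < n - 2 throughout
def pvAWhile : Nat → Int → Int → Int → PySem.Dict Int Int → PySem.Dict Int Int
  | 0, _, _, _, freq => freq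
  | fuel + 1, n, k, current, freq =>
      let c := PySem.Int.floordiv (current * (n - k)) (k + 1)
      pvAWhile fuel n (k + 1) c (pvTallyA freq c)

-- one iteration of 'for n in range(min_n, max_n + 1)'
def pvABody (freq : PySem.Dict Int Int) (n : Int) : PySem.Dict Int Int :=
  let current := PySem.Int.floordiv (n * (n - 1)) 2
  pvAWhile (n - 4).toNat n 2 current (pvTallyA freq current)

def find_frequent_binomials_fastest (min_n : Int) (max_n : Int) (threshold : Int) : List Int :=
  let freq := (PySem.List.pyRange min_n (max_n + 1) 1).foldl pvABody PySem.Dict.empty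
  -- 'for val in freq: if freq[val] > threshold: result.append(val)'; freq[val] is exact: val ∈ keys
  let result := freq.keys.foldl (fun acc v => if freq.getD v 0 > threshold then acc ++ [v] else acc) []
  PySem.List.sorted result (fun x => x) false

-- ===== PORT B =====
def pvComb (n : Int) (k : Int) : Int :=
  let k := if n - k < k then n - k else k
  let p := (PySem.List.pyRange 0 k 1).foldl (fun (p : Int × Int) i => (p.1 * (n - i), p.2 * (i + 1))) (1, 1)
  PySem.Int.floordiv p.1 p.2

def find_frequent_binomials_fastest_alt (min_n : Int) (max_n : Int) (threshold : Int) : List Int :=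
  let values := (PySem.List.pyRange min_n (max_n + 1) 1).foldl
    (fun acc n =>
      (acc ++ [PySem.Int.floordiv (n * (n - 1)) 2]) ++ (PySem.List.pyRange 3 (n - 1) 1).map (pvComb n)) []
  -- freq[v] = freq.get(v, 0) + 1, ported with PySem.Dict.modify (exact for d[k] = f(d.get(k, dflt)))
  let freq := values.foldl (fun d v => d.modify v 0 (· + 1)) PySem.Dict.empty
  PySem.List.sorted ((freq.items.filter (fun p => p.2 > threshold)).map (·.1)) (fun x => x) false

-- ===== PRECONDITION & SPEC =====
def Spec_find_frequent_binomials_fastest (min_n : Int) (max_n : Int) (threshold : Int) (out : List Int) : Prop := out = find_frequent_binomials_fastest_alt min_n max_n threshold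
instance (min_n : Int) (max_n : Int) (threshold : Int) (out : List Int) : Decidable (Spec_find_frequent_binomials_fastest min_n max_n threshold out) := by unfold Spec_find_frequent_binomials_fastest; infer_instance

-- ===== CLAIM (what is proved, stated in full; the proofs are below) =====
def Claim_equal_find_frequent_binomials_fastest : Prop := ∀ (min_n : Int) (max_n : Int) (threshold : Int), Dom_find_frequent_binomials_fastest min_n max_n threshold → Spec_find_frequent_binomials_fastest min_n max_n threshold (find_frequent_binomials_fastest min_n max_n threshold)

-- ===== LEMMAS AND PROOFS =====

-- the values A's while loop tallies, in order
def pvAVals : Nat → Int → Int → Int → List Int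
  | 0, _, _, _ => []
  | fuel + 1, n, k, current =>
      let c := PySem.Int.floordiv (current * (n - k)) (k + 1)
      c :: pvAVals fuel n (k + 1) c

theorem pvAWhile_eq_foldl (fuel : Nat) (n k current : Int) (freq : PySem.Dict Int Int) :
    pvAWhile fuel n k current freq =
      (pvAVals fuel n k current).foldl (fun d v => d.modify v 0 (· + 1)) freq := by
  induction fuel generalizing k current freq with
  | zero => rfl
  | succ f ih => simp [pvAWhile, pvAVals, ih, pvTallyA]

-- the full per-n value list
def pvVals (n : Int) : List Int :=
  PySem.Int.floordiv (n * (n - 1)) 2 ::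
    pvAVals (n - 4).toNat n 2 (PySem.Int.floordiv (n * (n - 1)) 2)

theorem pvABody_eq_foldl (freq : PySem.Dict Int Int) (n : Int) :
    pvABody freq n = (pvVals n).foldl (fun d v => d.modify v 0 (· + 1)) freq := by
  simp [pvABody, pvVals, pvAWhile_eq_foldl, pvTallyA]

theorem foldl_pvABody (l : List Int) (freq : PySem.Dict Int Int) :
    l.foldl pvABody freq = (l.flatMap pvVals).foldl (fun d v => d.modify v 0 (· + 1)) freq := by
  induction l generalizing freq with
  | nil => rfl
  | cons x xs ih => simp [List.flatMap_cons, List.foldl_append, ih, pvABody_eq_foldl]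

-- B's value-building loop also produces the per-n lists, concatenated
theorem foldl_pvBVals (l : List Int) (acc : List Int) :
    l.foldl (fun acc n =>
      (acc ++ [PySem.Int.floordiv (n * (n - 1)) 2]) ++ (PySem.List.pyRange 3 (n - 1) 1).map (pvComb n)) acc =
      acc ++ l.flatMap (fun n =>
        PySem.Int.floordiv (n * (n - 1)) 2 :: (PySem.List.pyRange 3 (n - 1) 1).map (pvComb n)) := by
  induction l generalizing acc with
  | nil => simp
  | cons x xs ih => simp [List.flatMap]


-- the numerator/denominator fold computes (descFactorial, factorial)
theorem pvProdFold (n k : Nat) :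
    (List.range k).foldl
      (fun (p : Int × Int) (i : Nat) => (p.1 * ((n:Int) - (i:Int)), p.2 * ((i:Int) + 1))) (1, 1)
      = ((n.descFactorial k : Int), (k.factorial : Int)) := by
  induction k with
  | zero => simp
  | succ k ih =>
    rw [List.range_succ, List.foldl_append, ih]
    simp only [List.foldl_cons, List.foldl_nil, Prod.mk.injEq]
    refine ⟨?_, ?_⟩
    · by_cases h : k ≤ n
      · have e : (n:Int) - k = ((n - k : Nat) : Int) := by push_cast [h]; ring
        rw [e, Nat.descFactorial_succ]
        push_cast; ring
      · have h1 : n.descFactorial k = 0 := Nat.descFactorial_eq_zero_iff_lt.2 (by omega)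
        have h2 : n.descFactorial (k+1) = 0 := Nat.descFactorial_eq_zero_iff_lt.2 (by omega)
        simp [h1]
    · rw [Nat.factorial_succ]; push_cast; ring

-- the unreduced core of pvComb computes choose
theorem pvCombCore_eq_choose (n k : Nat) :
    PySem.Int.floordiv
      (((PySem.List.pyRange 0 (k:Int) 1).foldl
        (fun (p : Int × Int) i => (p.1 * ((n:Int) - i), p.2 * (i + 1))) (1, 1)).1)
      (((PySem.List.pyRange 0 (k:Int) 1).foldl
        (fun (p : Int × Int) i => (p.1 * ((n:Int) - i), p.2 * (i + 1))) (1, 1)).2)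
      = (n.choose k : Int) := by
  rw [PySem.List.pyRange_one, show ((k:Int) - 0).toNat = k from by omega, List.foldl_map]
  simp only [zero_add]
  rw [pvProdFold, PySem.Int.floordiv_natCast, Nat.choose_eq_descFactorial_div_factorial]

theorem pvComb_eq_choose (n k : Nat) (hk : k ≤ n) :
    pvComb (n : Int) (k : Int) = (n.choose k : Int) := by
  unfold pvComb
  by_cases h : (n:Int) - (k:Int) < (k:Int)
  · rw [if_pos h, show (n:Int) - (k:Int) = (((n - k : Nat)) : Int) from by push_cast [hk]; ring,
      pvCombCore_eq_choose n (n - k), Nat.choose_symm hk]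
  · rw [if_neg h, pvCombCore_eq_choose n k]

-- one multiply-divide step of A's recurrence moves choose k to choose (k+1)
theorem pvChooseStep (n k : Nat) :
    PySem.Int.floordiv ((n.choose k : Int) * ((n:Int) - (k:Int))) ((k:Int) + 1) =
      (n.choose (k+1) : Int) := by
  by_cases h : k ≤ n
  · have e : (n:Int) - k = ((n - k : Nat) : Int) := by push_cast [h]; ring
    have e1 : (n.choose k : Int) * ((n - k : Nat) : Int) = ((n.choose k * (n - k) : Nat) : Int) := by
      push_cast; ring
    have e2 : ((k:Int) + 1) = (((k + 1 : Nat)) : Int) := by push_cast; ring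
    rw [e, e1, e2, PySem.Int.floordiv_natCast, ← Nat.choose_succ_right_eq,
      Nat.mul_div_cancel _ (by omega)]
  · have h1 : n.choose k = 0 := Nat.choose_eq_zero_of_lt (by omega)
    have h2 : n.choose (k+1) = 0 := Nat.choose_eq_zero_of_lt (by omega)
    have e2 : ((k:Int) + 1) = (((k + 1 : Nat)) : Int) := by push_cast; ring
    rw [h1, h2, e2, show ((0:Nat):Int) * ((n:Int) - (k:Int)) = ((0:Nat):Int) by push_cast; ring,
      PySem.Int.floordiv_natCast]
    simp

-- the running product tracks Nat.choose
theorem pvAVals_eq_map (fuel n k : Nat) :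
    pvAVals fuel (n : Int) (k : Int) ((n.choose k : Nat) : Int) =
      (List.range fuel).map (fun j => ((n.choose (k + 1 + j) : Nat) : Int)) := by
  induction fuel generalizing k with
  | zero => rfl
  | succ f ih =>
    simp only [pvAVals]
    rw [pvChooseStep n k, show ((k:Int) + 1) = (((k + 1 : Nat)) : Int) from by push_cast; ring,
      ih (k+1), List.range_succ_eq_map]
    simp only [List.map_cons, List.map_map, List.cons.injEq]
    refine ⟨by norm_num, List.map_congr_left (fun j _ => ?_)⟩
    simp only [Function.comp_apply]
    congr 2
    omega

-- head value is choose n 2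
theorem pvHead_eq_choose (n : Nat) :
    PySem.Int.floordiv ((n : Int) * ((n : Int) - 1)) 2 = (n.choose 2 : Int) := by
  rcases n with _ | m
  · decide
  · have e : ((m+1 : Nat) : Int) * (((m+1 : Nat) : Int) - 1) = (((m+1) * m : Nat) : Int) := by
      push_cast; ring
    rw [e, show (2:Int) = ((2:Nat):Int) from rfl, PySem.Int.floordiv_natCast,
      Nat.choose_two_right]
    norm_num

-- per-n lists agree
theorem pvVals_eq (n : Int) :
    pvVals n = PySem.Int.floordiv (n * (n - 1)) 2 :: (PySem.List.pyRange 3 (n - 1) 1).map (pvComb n) := by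
  unfold pvVals
  by_cases h5 : n ≤ 4
  · rw [show (n - 4).toNat = 0 by omega, PySem.List.pyRange_one_eq_nil (by omega)]
    rfl
  · congr 1
    obtain ⟨N, rfl⟩ : ∃ N : Nat, n = (N : Int) := ⟨n.toNat, by omega⟩
    rw [pvHead_eq_choose, show ((2:Int)) = ((2:Nat):Int) from rfl, pvAVals_eq_map,
      PySem.List.pyRange_one]
    have e : (((N:Int) - 1 - 3)).toNat = ((N:Int) - 4).toNat := by omega
    rw [e, List.map_map]
    refine List.map_congr_left (fun j hj => ?_)
    have hjN : 3 + j ≤ N := by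
      have := List.mem_range.mp hj
      omega
    show ((N.choose (2 + 1 + j) : Nat) : Int) = pvComb (N:Int) (3 + (j:Int))
    rw [show (3 + (j:Int)) = (((3 + j : Nat)) : Int) by push_cast; ring, pvComb_eq_choose N (3+j) hjN]

-- A's append-filter loop over the keys equals B's items filter, for a nodup-keys dict
theorem pvKeysFilter_eq (d : PySem.Dict Int Int) (hnd : d.keys.Nodup) (t : Int) :
    d.keys.foldl (fun acc v => if d.getD v 0 > t then acc ++ [v] else acc) [] =
      (d.items.filter (fun p => p.2 > t)).map (·.1) := by
  have h1 := PySem.List.foldl_append_if (fun v => decide (d.getD v 0 > t)) id d.keys []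
  simp only [decide_eq_true_eq, List.map_id, List.nil_append, id] at h1
  rw [h1, PySem.Dict.items_eq_map_keys d hnd 0, List.filter_map, List.map_map]
  simp [Function.comp_def]

-- ===== VERDICT (by name: the statement is the Claim_ definition above) =====
theorem find_frequent_binomials_fastest_spec : Claim_equal_find_frequent_binomials_fastest := by
  intro min_n max_n threshold _
  unfold Spec_find_frequent_binomials_fastest
  simp only [find_frequent_binomials_fastest, find_frequent_binomials_fastest_alt]
  rw [foldl_pvABody, foldl_pvBVals, List.nil_append]
  have hv : (PySem.List.pyRange min_n (max_n + 1) 1).flatMap (fun n =>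
        PySem.Int.floordiv (n * (n - 1)) 2 :: (PySem.List.pyRange 3 (n - 1) 1).map (pvComb n)) =
      (PySem.List.pyRange min_n (max_n + 1) 1).flatMap pvVals := by
    simp only [List.flatMap]
    congr 1
    exact List.map_congr_left (fun n _ => (pvVals_eq n).symm)
  rw [hv]
  set vals := (PySem.List.pyRange min_n (max_n + 1) 1).flatMap pvVals with hvals
  set d := vals.foldl (fun d v => d.modify v 0 (· + 1))
    (PySem.Dict.empty : PySem.Dict Int Int) with hd
  have hnd : d.keys.Nodup := by
    rw [hd]
    exact PySem.Dict.nodup_keys_foldl_modify_key vals (fun x => x) 0 (fun _ _ => (· + 1))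
      PySem.Dict.empty PySem.Dict.nodup_keys_empty
  rw [pvKeysFilter_eq d hnd threshold]
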